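-- pv_equiv track=rewrite | github.com/vladimirturbin/My-Py-Codewars | Catching Car Mileage Numbers/main.py | interesting
-- ===== SOURCE A (Python) =====
-- def interesting(number, awesome_phrases):
--     number_str = str(number)
--     number_list = [int(i) for i in number_str]
--
--     if number < 100:
--         return False
--
--     if number in awesome_phrases:
--         return True
--
--     if str(number) == number_str[::-1]:
--         return True
--
--     result = True
--     for i in range(len(number_list) - 1):
--         if number_list[i] != (number_list[i + 1] + 1) % 10:
--             result = False
--     if 0 in number_list[:-1]:
--         result = False
--     if result:
--         return True
--
--     result = True
--     for i in range(len(number_list) - 1):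
--         if number_list[i + 1] != (number_list[i] + 1) % 10:
--             result = False
--     if 0 in number_list[:-1]:
--         result = False
--     if result:
--         return True
--
--     if len(set(number_list)) == 1:
--         return True
--
--     if set(number_list[1:]) == {0}:
--         return True
--
--     return False
-- ===== SOURCE B (Python) =====
-- def interesting(number, awesome_phrases):
--     if number < 100:
--         return False
--     if number in awesome_phrases:
--         return True
--     s = str(number)
--     return (s == s[::-1]
--             or s in "1234567890"
--             or s in "9876543210"
--             or s[1:] == "0" * (len(s) - 1))
-- ===== Notes on version B (the rewrite author's own statement) =====
-- stated objective: simpler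
-- what changed: Replaces the digit-int list, the two index loops with mod-10 adjacency tests plus their interior-zero membership scans, and the two set constructions by direct string tests: palindrome, substring of the fixed references '1234567890'/'9876543210' (0 only occurs at their tails, so the interior-zero rule is built in), and a digit-then-zeros comparison; the all-same-digit check is dropped as subsumed by the palindrome test.
import Mathlib
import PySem

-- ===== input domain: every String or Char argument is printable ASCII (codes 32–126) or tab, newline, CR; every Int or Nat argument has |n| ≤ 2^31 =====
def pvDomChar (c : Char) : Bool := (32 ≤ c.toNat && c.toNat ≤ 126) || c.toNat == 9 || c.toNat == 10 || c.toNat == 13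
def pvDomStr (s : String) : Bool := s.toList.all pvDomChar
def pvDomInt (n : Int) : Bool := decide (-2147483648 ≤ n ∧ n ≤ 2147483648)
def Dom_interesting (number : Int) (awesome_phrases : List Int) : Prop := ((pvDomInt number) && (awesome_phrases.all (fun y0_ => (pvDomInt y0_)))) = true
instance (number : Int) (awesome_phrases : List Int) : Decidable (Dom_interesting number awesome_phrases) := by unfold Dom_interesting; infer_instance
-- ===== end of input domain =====

-- B replaces A's digit-int list, the two mod-10 adjacency loops with their interior-zero scans,
-- and the two set builds by direct string tests (palindrome, substring of fixed references, zeros tail);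
-- return values agree on every non-negative number (Pre_), and B returns False where A raises ValueError.

-- ===== PORT A =====
-- int(c) for a single char c: exact on the digit chars '0'..'9', the only chars str(number)
-- produces under Pre_interesting (A raises ValueError on the '-' of a negative number).
def digI (c : Char) : Int := (c.toNat : Int) - 48

def interesting (number : Int) (awesome_phrases : List Int) : Bool :=
  let numberStr : List Char := PySem.Int.toChars number
  let numberList : List Int := numberStr.map digI
  if number < 100 then false
  else if awesome_phrases.contains number then true
  -- str(number) == number_str[::-1]
  else if PySem.Int.toChars number = (PySem.List.slice? numberStr none none (-1)).getD [] then true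
  else
    let result1 := (PySem.List.pyRange 0 (PySem.List.len numberList - 1) 1).foldl
      (fun r i => if PySem.List.pyGetD numberList i 0 ≠ PySem.Int.mod (PySem.List.pyGetD numberList (i + 1) 0 + 1) 10 then false else r) true
    let result1 := if (PySem.List.slice numberList none (some (-1))).contains 0 then false else result1
    if result1 then true
    else
      let result2 := (PySem.List.pyRange 0 (PySem.List.len numberList - 1) 1).foldl
        (fun r i => if PySem.List.pyGetD numberList (i + 1) 0 ≠ PySem.Int.mod (PySem.List.pyGetD numberList i 0 + 1) 10 then false else r) true
      let result2 := if (PySem.List.slice numberList none (some (-1))).contains 0 then false else result2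
      if result2 then true
      else if PySem.List.len (PySem.Set.ofList numberList) = 1 then true
      else if PySem.Set.equal (PySem.Set.ofList (PySem.List.slice numberList (some 1) none)) (PySem.Set.ofList [0]) then true
      else false

-- ===== PORT B =====
def interesting_alt (number : Int) (awesome_phrases : List Int) : Bool :=
  if number < 100 then false
  else if awesome_phrases.contains number then true
  else
    let s : List Char := PySem.Int.toChars number
    (s = (PySem.List.slice? s none none (-1)).getD [])                -- s == s[::-1]
    || PySem.Chars.isIn s "1234567890".toList                          -- s in "1234567890"
    || PySem.Chars.isIn s "9876543210".toList                          -- s in "9876543210"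
    || (PySem.List.slice s (some 1) none = PySem.List.pyRepeat ['0'] (PySem.List.len s - 1))  -- s[1:] == "0"*(len(s)-1)

-- ===== PRECONDITION & SPEC =====
-- A raises ValueError on negative numbers (int('-') while listing the digits of str(number)); Pre_ excludes them.
def Pre_interesting (number : Int) (awesome_phrases : List Int) : Prop := 0 ≤ number
instance (number : Int) (awesome_phrases : List Int) : Decidable (Pre_interesting number awesome_phrases) := by unfold Pre_interesting; infer_instance
def pvWitness_interesting : Int × List Int := (121, [7])

def Spec_interesting (number : Int) (awesome_phrases : List Int) (out : Bool) : Prop := out = interesting_alt number awesome_phrases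
instance (number : Int) (awesome_phrases : List Int) (out : Bool) : Decidable (Spec_interesting number awesome_phrases out) := by unfold Spec_interesting; infer_instance

-- ===== CLAIM (what is proved, stated in full; the proofs are below) =====
def Claim_equal_interesting : Prop := ∀ (number : Int) (awesome_phrases : List Int), Dom_interesting number awesome_phrases → Pre_interesting number awesome_phrases → Spec_interesting number awesome_phrases (interesting number awesome_phrases)

-- ===== LEMMAS AND PROOFS =====

/-- A digit char: one of '0'..'9'. -/
abbrev pvDigit (c : Char) : Prop := 48 ≤ c.toNat ∧ c.toNat ≤ 57

lemma pvDigit_cases (c : Char) (h : pvDigit c) :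
    c = '0' ∨ c = '1' ∨ c = '2' ∨ c = '3' ∨ c = '4' ∨ c = '5' ∨ c = '6' ∨ c = '7' ∨ c = '8' ∨ c = '9' := by
  obtain ⟨h1, h2⟩ := h
  rw [← Char.ofNat_toNat c]
  interval_cases h : c.toNat <;> decide

lemma toDigitsCore_digits (f n : Nat) (acc : List Char) (hacc : ∀ c ∈ acc, pvDigit c) :
    ∀ c ∈ Nat.toDigitsCore 10 f n acc, pvDigit c := by
  induction f generalizing n acc with
  | zero => simpa [Nat.toDigitsCore]
  | succ f ih =>
    have hd : pvDigit (Nat.digitChar (n % 10)) := by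
      have : n % 10 < 10 := Nat.mod_lt _ (by omega)
      interval_cases h : n % 10 <;> decide
    have hcons : ∀ c ∈ Nat.digitChar (n % 10) :: acc, pvDigit c := by
      intro c hc
      rcases List.mem_cons.mp hc with h | h
      · exact h ▸ hd
      · exact hacc _ h
    simp only [Nat.toDigitsCore]
    split
    · exact hcons
    · exact ih _ _ hcons

lemma toChars_digits (n : Int) (hn : 0 ≤ n) : ∀ c ∈ PySem.Int.toChars n, pvDigit c := by
  have : ¬ n < 0 := by omega
  simp only [PySem.Int.toChars, this, if_false]
  exact toDigitsCore_digits _ _ [] (by simp)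

-- the loop accumulator: once false, always false; otherwise "all steps pass"
lemma foldl_false {α : Type} (p : α → Prop) [DecidablePred p] (L : List α) :
    L.foldl (fun r i => if p i then false else r) false = false := by
  induction L with
  | nil => rfl
  | cons x L ih =>
    simp only [List.foldl_cons]
    by_cases hx : p x
    · rw [if_pos hx]; exact ih
    · rw [if_neg hx]; exact ih

lemma foldl_false_iff {α : Type} (p : α → Prop) [DecidablePred p] (L : List α) (b : Bool) :
    L.foldl (fun r i => if p i then false else r) b = (b && L.all (fun i => decide ¬ p i)) := by
  induction L generalizing b with
  | nil => simp
  | cons x L ih =>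
    simp only [List.foldl_cons, List.all_cons]
    by_cases hx : p x
    · rw [if_pos hx, foldl_false]
      simp [hx]
    · rw [if_neg hx, ih]
      simp [hx]

lemma digI_eq_zero_iff (c : Char) : digI c = 0 ↔ c = '0' := by
  constructor
  · intro h
    have h48 : c.toNat = 48 := by unfold digI at h; omega
    have := Char.ofNat_toNat c
    rw [h48] at this; exact this.symm
  · intro h; subst h; rfl

/-- generic: a nonempty chain whose every step moves one position right in `ref` is a prefix
    of the suffix of `ref` starting at its head's position. -/
lemma run_prefix (ref : List Char) (pos : Char → Nat) (rel : Char → Char → Prop)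
    (hpos : ∀ c, pvDigit c → ref.drop (pos c) = c :: ref.drop (pos c + 1))
    (hstep : ∀ a b, pvDigit a → pvDigit b → a ≠ '0' → rel a b → pos b = pos a + 1) :
    ∀ (l : List Char) (c : Char), (∀ x ∈ c :: l, pvDigit x) → List.IsChain rel (c :: l) →
      '0' ∉ (c :: l).dropLast → (c :: l) <+: ref.drop (pos c) := by
  intro l
  induction l with
  | nil =>
    intro c hd _ _
    rw [hpos c (hd c (by simp))]
    exact List.cons_prefix_cons.mpr ⟨rfl, List.nil_prefix⟩
  | cons b l ih =>
    intro c hd hch hz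
    have hrel : rel c b := List.IsChain.rel hch
    have hch' : List.IsChain rel (b :: l) := List.IsChain.of_cons hch
    have hc : pvDigit c := hd c (by simp)
    have hb : pvDigit b := hd b (by simp)
    have hc0 : c ≠ '0' := by
      intro h
      exact hz (h ▸ List.mem_cons_self)
    have hpb : pos b = pos c + 1 := hstep c b hc hb hc0 hrel
    have hpre : (b :: l) <+: ref.drop (pos b) := by
      apply ih b (by intro x hx; exact hd x (List.mem_cons_of_mem _ hx)) hch'
      intro hx
      apply hz
      simp only [List.dropLast_cons₂]
      exact List.mem_cons_of_mem _ hx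
    rw [hpos c hc, ← hpb]
    exact List.cons_prefix_cons.mpr ⟨rfl, hpre⟩

-- ascending reference and positions
def ascRef : List Char := "1234567890".toList
def posAsc (c : Char) : Nat := if c = '0' then 9 else c.toNat - 49
abbrev relAsc (a b : Char) : Prop := digI b = PySem.Int.mod (digI a + 1) 10

-- descending reference and positions
def descRef : List Char := "9876543210".toList
def posDesc (c : Char) : Nat := if c = '0' then 9 else 57 - c.toNat
abbrev relDesc (a b : Char) : Prop := digI a = PySem.Int.mod (digI b + 1) 10

lemma hpos_asc : ∀ c, pvDigit c → ascRef.drop (posAsc c) = c :: ascRef.drop (posAsc c + 1) := by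
  intro c hc
  rcases pvDigit_cases c hc with rfl | rfl | rfl | rfl | rfl | rfl | rfl | rfl | rfl | rfl <;> decide

lemma hpos_desc : ∀ c, pvDigit c → descRef.drop (posDesc c) = c :: descRef.drop (posDesc c + 1) := by
  intro c hc
  rcases pvDigit_cases c hc with rfl | rfl | rfl | rfl | rfl | rfl | rfl | rfl | rfl | rfl <;> decide

lemma hstep_asc : ∀ a b, pvDigit a → pvDigit b → a ≠ '0' → relAsc a b → posAsc b = posAsc a + 1 := by
  intro a b ha hb h0 hr
  rcases pvDigit_cases a ha with rfl | rfl | rfl | rfl | rfl | rfl | rfl | rfl | rfl | rfl <;>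
    rcases pvDigit_cases b hb with rfl | rfl | rfl | rfl | rfl | rfl | rfl | rfl | rfl | rfl <;>
    revert h0 hr <;> decide

lemma hstep_desc : ∀ a b, pvDigit a → pvDigit b → a ≠ '0' → relDesc a b → posDesc b = posDesc a + 1 := by
  intro a b ha hb h0 hr
  rcases pvDigit_cases a ha with rfl | rfl | rfl | rfl | rfl | rfl | rfl | rfl | rfl | rfl <;>
    rcases pvDigit_cases b hb with rfl | rfl | rfl | rfl | rfl | rfl | rfl | rfl | rfl | rfl <;>
    revert h0 hr <;> decide

set_option maxRecDepth 8192 in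
lemma asc_all : ∀ i < 11, ∀ j < 11,
    List.IsChain relAsc ((ascRef.drop i).take j) ∧ '0' ∉ ((ascRef.drop i).take j).dropLast := by
  decide

set_option maxRecDepth 8192 in
lemma desc_all : ∀ i < 11, ∀ j < 11,
    List.IsChain relDesc ((descRef.drop i).take j) ∧ '0' ∉ ((descRef.drop i).take j).dropLast := by
  decide

lemma chain_infix_iff (ref : List Char) (pos : Char → Nat) (rel : Char → Char → Prop)
    (href : ref.length = 10)
    (hpos : ∀ c, pvDigit c → ref.drop (pos c) = c :: ref.drop (pos c + 1))
    (hstep : ∀ a b, pvDigit a → pvDigit b → a ≠ '0' → rel a b → pos b = pos a + 1)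
    (hall : ∀ i < 11, ∀ j < 11,
      List.IsChain rel ((ref.drop i).take j) ∧ '0' ∉ ((ref.drop i).take j).dropLast)
    (l : List Char) (hd : ∀ c ∈ l, pvDigit c) :
    (List.IsChain rel l ∧ '0' ∉ l.dropLast) ↔ l <:+: ref := by
  constructor
  · rintro ⟨hch, hz⟩
    cases l with
    | nil => exact List.nil_infix
    | cons c t =>
      have hpre := run_prefix ref pos rel hpos hstep t c hd hch hz
      exact hpre.isInfix.trans (List.drop_suffix _ _).isInfix
  · intro h
    obtain ⟨s, t, hst⟩ := h
    have hlen : s.length + (l.length + t.length) = 10 := by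
      have := congrArg List.length hst
      simpa [← href] using this
    have hdrop : ref.drop s.length = l ++ t := by
      rw [← hst, List.append_assoc]
      exact List.drop_left
    have hl : l = (ref.drop s.length).take l.length := by
      rw [hdrop, List.take_left]
    rw [hl]
    exact hall s.length (by omega) l.length (by omega)

lemma asc_iff (l : List Char) (hd : ∀ c ∈ l, pvDigit c) :
    (List.IsChain relAsc l ∧ '0' ∉ l.dropLast) ↔ l <:+: ascRef :=
  chain_infix_iff ascRef posAsc relAsc (by decide) hpos_asc hstep_asc asc_all l hd

lemma desc_iff (l : List Char) (hd : ∀ c ∈ l, pvDigit c) :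
    (List.IsChain relDesc l ∧ '0' ∉ l.dropLast) ↔ l <:+: descRef :=
  chain_infix_iff descRef posDesc relDesc (by decide) hpos_desc hstep_desc desc_all l hd


lemma digI_inj {a b : Char} (h : digI a = digI b) : a = b := by
  have ht : a.toNat = b.toNat := by unfold digI at h; omega
  rw [← Char.ofNat_toNat a, ← Char.ofNat_toNat b, ht]

-- A's adjacent-digit loop computes exactly the chain condition (shape of loop 1)
lemma loop_iff (xs : List Int) (f : Int → Int) (hl : 1 ≤ xs.length) :
    (((PySem.List.pyRange 0 (PySem.List.len xs - 1) 1).foldl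
      (fun r i => if PySem.List.pyGetD xs i 0 ≠ f (PySem.List.pyGetD xs (i + 1) 0) then false else r) true) = true)
    ↔ List.IsChain (fun a b => a = f b) xs := by
  have hn : PySem.List.len xs - 1 = ((xs.length - 1 : Nat) : Int) := by
    rw [PySem.List.len_eq]; omega
  rw [hn, PySem.List.pyRange_zero_natCast, List.foldl_map,
    foldl_false_iff (fun k : Nat => PySem.List.pyGetD xs (k : Int) 0 ≠ f (PySem.List.pyGetD xs ((k : Int) + 1) 0))]
  simp only [Bool.true_and, List.all_eq_true, decide_eq_true_eq, List.mem_range, not_not]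
  rw [List.isChain_iff_getElem]
  constructor
  · intro h i hi
    have := h i (by omega)
    rw [PySem.List.pyGetD_natCast, show ((i : Int) + 1) = ((i + 1 : Nat) : Int) by push_cast; ring,
      PySem.List.pyGetD_natCast, List.getD_eq_getElem _ _ (by omega), List.getD_eq_getElem _ _ (by omega)] at this
    exact this
  · intro h k hk
    rw [PySem.List.pyGetD_natCast, show ((k : Int) + 1) = ((k + 1 : Nat) : Int) by push_cast; ring,
      PySem.List.pyGetD_natCast, List.getD_eq_getElem _ _ (by omega), List.getD_eq_getElem _ _ (by omega)]
    exact h k (by omega)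

-- the same for the second loop, whose inequality is written the other way round
lemma loop_iff' (xs : List Int) (f : Int → Int) (hl : 1 ≤ xs.length) :
    (((PySem.List.pyRange 0 (PySem.List.len xs - 1) 1).foldl
      (fun r i => if PySem.List.pyGetD xs (i + 1) 0 ≠ f (PySem.List.pyGetD xs i 0) then false else r) true) = true)
    ↔ List.IsChain (fun a b => b = f a) xs := by
  have hn : PySem.List.len xs - 1 = ((xs.length - 1 : Nat) : Int) := by
    rw [PySem.List.len_eq]; omega
  rw [hn, PySem.List.pyRange_zero_natCast, List.foldl_map,
    foldl_false_iff (fun k : Nat => PySem.List.pyGetD xs ((k : Int) + 1) 0 ≠ f (PySem.List.pyGetD xs (k : Int) 0))]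
  simp only [Bool.true_and, List.all_eq_true, decide_eq_true_eq, List.mem_range, not_not]
  rw [List.isChain_iff_getElem]
  constructor
  · intro h i hi
    have := h i (by omega)
    rw [PySem.List.pyGetD_natCast, show ((i : Int) + 1) = ((i + 1 : Nat) : Int) by push_cast; ring,
      PySem.List.pyGetD_natCast, List.getD_eq_getElem _ _ (by omega), List.getD_eq_getElem _ _ (by omega)] at this
    exact this
  · intro h k hk
    rw [PySem.List.pyGetD_natCast, show ((k : Int) + 1) = ((k + 1 : Nat) : Int) by push_cast; ring,
      PySem.List.pyGetD_natCast, List.getD_eq_getElem _ _ (by omega), List.getD_eq_getElem _ _ (by omega)]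
    exact h k (by omega)

-- len(set(number_list)) == 1 forces a one-digit repertoire, hence a palindrome
lemma set_len_one_pal (l : List Char) (h : PySem.List.len (PySem.Set.ofList (l.map digI)) = 1) :
    l = l.reverse := by
  rw [PySem.List.len_eq] at h
  have h1 : (PySem.Set.ofList (l.map digI)).length = 1 := by omega
  obtain ⟨a, ha⟩ := List.length_eq_one_iff.mp h1
  have hall : ∀ x ∈ l.map digI, x = a := by
    intro x hx
    have hm : x ∈ PySem.Set.ofList (l.map digI) := (PySem.Set.mem_ofList _ _).mpr hx
    rw [ha] at hm
    simpa using hm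
  cases l with
  | nil => rfl
  | cons c t =>
    have hceq : ∀ x ∈ c :: t, x = c := by
      intro x hx
      have h1 := hall (digI x) (List.mem_map_of_mem hx)
      have h2 := hall (digI c) (List.mem_map_of_mem List.mem_cons_self)
      exact digI_inj (h1.trans h2.symm)
    rw [List.eq_replicate_of_mem hceq, List.reverse_replicate]

-- set(xs) == {0}
lemma setequal_zero_iff (xs : List Int) :
    PySem.Set.equal (PySem.Set.ofList xs) (PySem.Set.ofList [0]) = true ↔ xs ≠ [] ∧ ∀ x ∈ xs, x = 0 := by
  have hofl : PySem.Set.ofList [(0 : Int)] = [0] := rfl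
  rw [hofl]
  unfold PySem.Set.equal PySem.Set.issubset
  simp only [Bool.and_eq_true, List.all_eq_true, PySem.Set.contains_iff, PySem.Set.mem_ofList,
    List.mem_cons, List.not_mem_nil, or_false]
  constructor
  · rintro ⟨h1, h2⟩
    exact ⟨List.ne_nil_of_mem (h2 0 rfl), h1⟩
  · rintro ⟨h1, h2⟩
    refine ⟨h2, ?_⟩
    intro x hx
    subst hx
    cases xs with
    | nil => exact absurd rfl h1
    | cons x t => exact (h2 x List.mem_cons_self) ▸ List.mem_cons_self

-- ===== VERDICT (by name: the statement is the Claim_ definition above) =====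
theorem interesting_spec : Claim_equal_interesting := by
  intro number phrases _ hpre
  unfold Spec_interesting interesting interesting_alt
  by_cases h100 : number < 100
  · simp only [if_pos h100]
  · simp only [if_neg h100]
    by_cases hmem : phrases.contains number = true
    · simp only [hmem, if_pos]
    · simp only [Bool.not_eq_true] at hmem
      simp only [hmem, Bool.false_eq_true, if_false]
      have hdig := toChars_digits number hpre
      rw [PySem.List.slice?_none_none_neg_one]
      simp only [Option.getD_some]
      generalize hGen : PySem.Int.toChars number = l
      rw [hGen] at hdig
      by_cases hpal : l = l.reverse
      · rw [if_pos hpal]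
        symm
        simp only [Bool.or_eq_true, decide_eq_true_eq]
        exact Or.inl (Or.inl (Or.inl hpal))
      · rw [if_neg hpal]
        have hlen2 : 2 ≤ l.length := by
          rcases l with _ | ⟨c, _ | ⟨d, t⟩⟩
          · exact absurd rfl hpal
          · exact absurd rfl hpal
          · simp [List.length_cons]
        have hzc : ((PySem.List.slice (List.map digI l) none (some (-1))).contains 0 = true) ↔
            '0' ∈ l.dropLast := by
          rw [PySem.List.slice_to_neg_one, ← List.map_dropLast]
          rw [List.contains_iff_mem]
          constructor
          · intro h
            rw [List.mem_map] at h
            obtain ⟨c, hc, hc0⟩ := h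
            exact (digI_eq_zero_iff c).mp hc0 ▸ hc
          · intro h
            exact List.mem_map_of_mem (f := digI) h
        have hchainD : (List.foldl (fun r i => if PySem.List.pyGetD (List.map digI l) i 0 ≠
              PySem.Int.mod (PySem.List.pyGetD (List.map digI l) (i + 1) 0 + 1) 10 then false else r) true
              (PySem.List.pyRange 0 (PySem.List.len (List.map digI l) - 1) 1) = true) ↔
            List.IsChain relDesc l := by
          have h1 := loop_iff (List.map digI l) (fun y => PySem.Int.mod (y + 1) 10)
            (by rw [List.length_map]; omega)
          exact h1.trans (List.isChain_map digI)
        have hchainA : (List.foldl (fun r i => if PySem.List.pyGetD (List.map digI l) (i + 1) 0 ≠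
              PySem.Int.mod (PySem.List.pyGetD (List.map digI l) i 0 + 1) 10 then false else r) true
              (PySem.List.pyRange 0 (PySem.List.len (List.map digI l) - 1) 1) = true) ↔
            List.IsChain relAsc l := by
          have h1 := loop_iff' (List.map digI l) (fun y => PySem.Int.mod (y + 1) 10)
            (by rw [List.length_map]; omega)
          exact h1.trans (List.isChain_map digI)
        have hsame : ¬ (PySem.List.len (PySem.Set.ofList (List.map digI l)) = 1) :=
          fun h => hpal (set_len_one_pal l h)
        have hdescB : (PySem.Chars.isIn l "9876543210".toList = true) ↔
            (List.IsChain relDesc l ∧ '0' ∉ l.dropLast) :=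
          (PySem.Chars.isIn_iff_infix l descRef).trans (desc_iff l hdig).symm
        have hascB : (PySem.Chars.isIn l "1234567890".toList = true) ↔
            (List.IsChain relAsc l ∧ '0' ∉ l.dropLast) :=
          (PySem.Chars.isIn_iff_infix l ascRef).trans (asc_iff l hdig).symm
        have htzA : ((PySem.Set.ofList (PySem.List.slice (List.map digI l) (some 1) none)).equal
              (PySem.Set.ofList [0]) = true) ↔ (∀ c ∈ l.tail, c = '0') := by
          rw [PySem.List.slice_from_one, ← List.map_tail, setequal_zero_iff]
          constructor
          · rintro ⟨hne, hz⟩ c hc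
            exact (digI_eq_zero_iff c).mp (hz _ (List.mem_map_of_mem hc))
          · intro h
            refine ⟨?_, ?_⟩
            · have : l.tail.length = l.length - 1 := List.length_tail
              intro hnil
              rw [List.map_eq_nil_iff] at hnil
              have := congrArg List.length hnil
              simp [List.length_tail] at this
              omega
            · intro x hx
              rw [List.mem_map] at hx
              obtain ⟨c, hc, rfl⟩ := hx
              rw [h c hc]
              rfl
        have htzB : (PySem.List.slice l (some 1) none = PySem.List.pyRepeat ['0'] (PySem.List.len l - 1)) ↔
            (∀ c ∈ l.tail, c = '0') := by
          rw [PySem.List.slice_from_one, PySem.List.pyRepeat_singleton]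
          have hh : (PySem.List.len l - 1).toNat = l.length - 1 := by rw [PySem.List.len_eq]; omega
          rw [hh, List.eq_replicate_iff]
          simp [List.length_tail]
        apply Bool.coe_iff_coe.mp
        simp only [Bool.or_eq_true, decide_eq_true_eq]
        have hfne : ¬ ((false : Bool) = true) := Bool.false_ne_true
        by_cases hzero : '0' ∈ l.dropLast
        · rw [if_pos (hzc.mpr hzero), if_pos (hzc.mpr hzero), if_neg hfne, if_neg hfne, if_neg hsame]
          by_cases hT : ∀ c ∈ l.tail, c = '0'
          · rw [if_pos (htzA.mpr hT)]
            exact iff_of_true rfl (Or.inr (htzB.mpr hT))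
          · rw [if_neg (fun h => hT (htzA.mp h))]
            refine iff_of_false (by simp) ?_
            rintro (((h | h) | h) | h)
            · exact hpal h
            · exact (hascB.mp h).2 hzero
            · exact (hdescB.mp h).2 hzero
            · exact hT (htzB.mp h)
        · rw [if_neg (fun h => hzero (hzc.mp h)), if_neg (fun h => hzero (hzc.mp h))]
          by_cases hD : List.IsChain relDesc l
          · rw [if_pos (hchainD.mpr hD)]
            exact iff_of_true rfl (Or.inl (Or.inr (hdescB.mpr ⟨hD, hzero⟩)))
          · rw [if_neg (fun h => hD (hchainD.mp h))]
            by_cases hA : List.IsChain relAsc l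
            · rw [if_pos (hchainA.mpr hA)]
              exact iff_of_true rfl (Or.inl (Or.inl (Or.inr (hascB.mpr ⟨hA, hzero⟩))))
            · rw [if_neg (fun h => hA (hchainA.mp h)), if_neg hsame]
              by_cases hT : ∀ c ∈ l.tail, c = '0'
              · rw [if_pos (htzA.mpr hT)]
                exact iff_of_true rfl (Or.inr (htzB.mpr hT))
              · rw [if_neg (fun h => hT (htzA.mp h))]
                refine iff_of_false (by simp) ?_
                rintro (((h | h) | h) | h)
                · exact hpal h
                · exact hA (hascB.mp h).1
                · exact hD (hdescB.mp h).1
                · exact hT (htzB.mp h)
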